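-- pv_equiv track=rewrite | github.com/ML4LitS/OTAR3088 | tokenize_preprocess.py | convert_IOB_transformer
-- ===== SOURCE A (Python) =====
-- def convert_IOB_transformer(test_list, pattern):
--     """
--     Converts a sequence of tokens/tags to IOB2 format.
--
--     Args:
--         test_list (list): A list of tokens or tags.
--         pattern (str): A pattern used to split the sequence.
--
--     Returns:
--         list: A list of lists, with tokens/tags grouped.
--     """
--     new_list = []
--     sub_list = []
--
--     for i in test_list:
--         if i != pattern:
--             sub_list.append(i)
--         else:
--             new_list.append(sub_list)
--             sub_list = []
--
--     return new_list
-- ===== SOURCE B (Python) =====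
-- def convert_IOB_transformer(test_list, pattern):
--     result = []
--     rest = test_list
--     while True:
--         try:
--             idx = rest.index(pattern)
--         except ValueError:
--             return result
--         result.append(rest[:idx])
--         rest = rest[idx + 1:]
-- ===== Notes on version B (the rewrite author's own statement) =====
-- stated objective: alternative
-- what changed: B replaces A's element-by-element accumulator loop with a loop that repeatedly finds the next delimiter via list.index and slices off the segment before it, dropping the tail after the last delimiter just as A does.
import Mathlib
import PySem

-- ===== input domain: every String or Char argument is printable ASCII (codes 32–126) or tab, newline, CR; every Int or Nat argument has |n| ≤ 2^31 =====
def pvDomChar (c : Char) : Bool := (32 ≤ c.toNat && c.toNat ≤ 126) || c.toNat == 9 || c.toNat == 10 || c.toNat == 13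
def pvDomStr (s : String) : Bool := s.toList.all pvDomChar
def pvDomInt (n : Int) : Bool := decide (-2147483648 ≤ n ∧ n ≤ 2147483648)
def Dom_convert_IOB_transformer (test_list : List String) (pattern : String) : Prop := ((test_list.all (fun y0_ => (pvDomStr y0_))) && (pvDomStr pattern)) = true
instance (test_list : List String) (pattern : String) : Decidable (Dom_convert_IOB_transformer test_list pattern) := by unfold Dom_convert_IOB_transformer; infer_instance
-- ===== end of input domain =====

-- B replaces A's element-by-element accumulator loop with repeated list.index + slicing; same cost, different decomposition.

-- ===== PORT A =====
-- for i in test_list: if i != pattern: sub_list.append(i) else: new_list.append(sub_list); sub_list = []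
def convert_IOB_transformer (test_list : List String) (pattern : String) : List (List String) :=
  (test_list.foldl
    (fun (st : List (List String) × List String) i =>
      if i ≠ pattern then (st.1, st.2 ++ [i]) else (st.1 ++ [st.2], []))
    ([], [])).1

-- ===== PORT B =====
-- termination fact for the B loop: rest shrinks at each iteration (rest = rest[idx+1:])
theorem pv_slice_from_lt (rest : List String) (pattern : String) (idx : Nat)
    (h : PySem.List.index? rest pattern = some idx) :
    (PySem.List.slice rest (some ((idx : Int) + 1)) none).length < rest.length := by
  have h1 : ((idx : Int) + 1) = ((idx + 1 : Nat) : Int) := by push_cast; ring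
  rw [h1, PySem.List.slice_from_natCast, List.length_drop]
  obtain ⟨hk, -, -⟩ := PySem.List.getElem_of_index?_eq_some h
  omega

-- while True: idx = rest.index(pattern) (return result on ValueError); result.append(rest[:idx]); rest = rest[idx+1:]
def convert_IOB_transformer_alt_go (pattern : String) (result : List (List String)) (rest : List String) : List (List String) :=
  match h : PySem.List.index? rest pattern with
  | none => result
  | some idx =>
      convert_IOB_transformer_alt_go pattern
        (result ++ [PySem.List.slice rest none (some (idx : Int))])
        (PySem.List.slice rest (some ((idx : Int) + 1)) none)
termination_by rest.length
decreasing_by exact pv_slice_from_lt rest pattern idx h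

def convert_IOB_transformer_alt (test_list : List String) (pattern : String) : List (List String) :=
  convert_IOB_transformer_alt_go pattern [] test_list

-- ===== PRECONDITION & SPEC =====
def Spec_convert_IOB_transformer (test_list : List String) (pattern : String) (out : List (List String)) : Prop := out = convert_IOB_transformer_alt test_list pattern
instance (test_list : List String) (pattern : String) (out : List (List String)) : Decidable (Spec_convert_IOB_transformer test_list pattern out) := by unfold Spec_convert_IOB_transformer; infer_instance

-- ===== CLAIM (what is proved, stated in full; the proofs are below) =====
def Claim_equal_convert_IOB_transformer : Prop := ∀ (test_list : List String) (pattern : String), Dom_convert_IOB_transformer test_list pattern → Spec_convert_IOB_transformer test_list pattern (convert_IOB_transformer test_list pattern)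

-- ===== LEMMAS AND PROOFS =====

theorem go_none {pattern : String} {res : List (List String)} {rest : List String}
    (h : PySem.List.index? rest pattern = none) :
    convert_IOB_transformer_alt_go pattern res rest = res := by
  rw [convert_IOB_transformer_alt_go]
  split
  · rfl
  · next idx heq => rw [h] at heq; cases heq

theorem go_some {pattern : String} {res : List (List String)} {rest : List String} {idx : Nat}
    (h : PySem.List.index? rest pattern = some idx) :
    convert_IOB_transformer_alt_go pattern res rest =
      convert_IOB_transformer_alt_go pattern
        (res ++ [PySem.List.slice rest none (some (idx : Int))])
        (PySem.List.slice rest (some ((idx : Int) + 1)) none) := by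
  rw [convert_IOB_transformer_alt_go]
  split
  · next heq => rw [h] at heq; cases heq
  · next idx' heq =>
      rw [h] at heq
      cases heq
      rfl

theorem index?_append_cons_self {sub xs : List String} {pattern : String}
    (hsub : pattern ∉ sub) :
    PySem.List.index? (sub ++ pattern :: xs) pattern = some sub.length := by
  rw [PySem.List.index?_eq_some_iff]
  exact ⟨sub, xs, rfl, rfl, hsub⟩

theorem main_invariant (pattern : String) (l : List String) :
    ∀ (sub : List String) (res : List (List String)), pattern ∉ sub →
    (l.foldl
      (fun (st : List (List String) × List String) i =>
        if i ≠ pattern then (st.1, st.2 ++ [i]) else (st.1 ++ [st.2], []))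
      (res, sub)).1 = convert_IOB_transformer_alt_go pattern res (sub ++ l) := by
  induction l with
  | nil =>
      intro sub res hsub
      simp only [List.foldl_nil, List.append_nil]
      rw [go_none (by rw [PySem.List.index?_eq_none_iff]; exact hsub)]
  | cons x xs ih =>
      intro sub res hsub
      by_cases hx : x = pattern
      · rw [hx] at *
        simp only [List.foldl_cons, ne_eq, not_true_eq_false, if_false]
        rw [ih [] (res ++ [sub]) (List.not_mem_nil), List.nil_append]
        rw [go_some (index?_append_cons_self hsub)]
        have htake : PySem.List.slice (sub ++ pattern :: xs) none (some (sub.length : Int)) = sub := by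
          rw [PySem.List.slice_to_natCast]
          exact List.take_left
        have hdrop : PySem.List.slice (sub ++ pattern :: xs) (some ((sub.length : Int) + 1)) none = xs := by
          have h1 : ((sub.length : Int) + 1) = ((sub.length + 1 : Nat) : Int) := by push_cast; ring
          rw [h1, PySem.List.slice_from_natCast]
          rw [show sub ++ pattern :: xs = (sub ++ [pattern]) ++ xs by simp]
          rw [show sub.length + 1 = (sub ++ [pattern]).length by simp]
          exact List.drop_left
        rw [htake, hdrop]
      · simp only [List.foldl_cons, ne_eq, hx, not_false_eq_true, if_true]
        rw [ih (sub ++ [x]) res (by simp [hsub, Ne.symm hx])]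
        simp

-- ===== VERDICT (by name: the statement is the Claim_ definition above) =====
theorem convert_IOB_transformer_spec : Claim_equal_convert_IOB_transformer := by
  intro test_list pattern _
  unfold Spec_convert_IOB_transformer convert_IOB_transformer convert_IOB_transformer_alt
  have := main_invariant pattern test_list [] [] (List.not_mem_nil)
  simpa using this
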